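-- pv_equiv track=rewrite | github.com/RobertS92/Gravity_Score | gravity/nil/entity_resolution.py | _positions_similar
-- ===== SOURCE A (Python) =====
-- def _positions_similar(pos1: str, pos2: str) -> bool:
--     """Check if positions are similar"""
--     p1 = pos1.lower().strip()
--     p2 = pos2.lower().strip()
--
--     if p1 == p2:
--         return True
--
--     # Position groups (positions in same group are similar)
--     position_groups = [
--         ['qb', 'quarterback'],
--         ['rb', 'running back', 'running-back', 'runningback'],
--         ['wr', 'wide receiver', 'wide-receiver', 'receiver'],
--         ['te', 'tight end', 'tight-end'],
--         ['ol', 'offensive line', 'offensive-line', 'o-line'],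
--         ['dl', 'defensive line', 'defensive-line', 'd-line'],
--         ['lb', 'linebacker', 'line-backer'],
--         ['db', 'defensive back', 'defensive-back', 'secondary'],
--         ['cb', 'cornerback', 'corner-back'],
--         ['s', 'safety']
--     ]
--
--     for group in position_groups:
--         if p1 in group and p2 in group:
--             return True
--
--     return False
-- ===== SOURCE B (Python) =====
-- _POSITION_GROUPS = [
--     ['qb', 'quarterback'],
--     ['rb', 'running back', 'running-back', 'runningback'],
--     ['wr', 'wide receiver', 'wide-receiver', 'receiver'],
--     ['te', 'tight end', 'tight-end'],
--     ['ol', 'offensive line', 'offensive-line', 'o-line'],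
--     ['dl', 'defensive line', 'defensive-line', 'd-line'],
--     ['lb', 'linebacker', 'line-backer'],
--     ['db', 'defensive back', 'defensive-back', 'secondary'],
--     ['cb', 'cornerback', 'corner-back'],
--     ['s', 'safety']
-- ]
--
-- # alias -> group id, built once
-- _TABLE = {alias: i for i, group in enumerate(_POSITION_GROUPS) for alias in group}
--
--
-- def _positions_similar(pos1: str, pos2: str) -> bool:
--     """Check if positions are similar"""
--     p1 = pos1.lower().strip()
--     p2 = pos2.lower().strip()
--     if p1 == p2:
--         return True
--     g1 = _TABLE.get(p1)
--     return g1 is not None and g1 == _TABLE.get(p2)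
-- ===== Notes on version B (the rewrite author's own statement) =====
-- stated objective: idiomatic
-- what changed: Replaces the per-call scan over all position groups (membership-testing both strings in every group) by a module-level dict mapping each alias to its group id, built once, so the call does two constant-time lookups and compares the ids.
import Mathlib
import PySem

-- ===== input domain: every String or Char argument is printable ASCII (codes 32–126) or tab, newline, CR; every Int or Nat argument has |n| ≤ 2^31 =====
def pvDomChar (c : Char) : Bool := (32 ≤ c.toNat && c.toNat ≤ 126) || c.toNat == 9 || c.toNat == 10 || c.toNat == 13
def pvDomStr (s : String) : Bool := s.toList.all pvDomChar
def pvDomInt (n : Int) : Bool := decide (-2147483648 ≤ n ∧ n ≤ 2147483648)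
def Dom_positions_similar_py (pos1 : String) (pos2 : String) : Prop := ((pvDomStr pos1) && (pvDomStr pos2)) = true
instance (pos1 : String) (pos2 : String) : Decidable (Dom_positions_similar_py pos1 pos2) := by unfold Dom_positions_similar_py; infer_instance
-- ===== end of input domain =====

-- B replaces A's per-call scan over the position groups by a dict (alias -> group id) built once,
-- then two lookups and an id comparison (objective: idiomatic; return value proved equal).

-- ===== PORT A =====
-- the position_groups literal (shared by both ports; both Pythons carry the same literal)
def pvGroups : List (List String) :=
  [ ["qb", "quarterback"],
    ["rb", "running back", "running-back", "runningback"],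
    ["wr", "wide receiver", "wide-receiver", "receiver"],
    ["te", "tight end", "tight-end"],
    ["ol", "offensive line", "offensive-line", "o-line"],
    ["dl", "defensive line", "defensive-line", "d-line"],
    ["lb", "linebacker", "line-backer"],
    ["db", "defensive back", "defensive-back", "secondary"],
    ["cb", "cornerback", "corner-back"],
    ["s", "safety"] ]

-- the 'for group in position_groups: if p1 in group and p2 in group: return True' loop
def pvScan (gs : List (List String)) (p1 p2 : String) : Bool :=
  match gs with
  | [] => false
  | g :: rest => if g.contains p1 && g.contains p2 then true else pvScan rest p1 p2

def positions_similar_py (pos1 : String) (pos2 : String) : Bool :=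
  let p1 := PySem.Str.strip (PySem.Str.lower pos1)
  let p2 := PySem.Str.strip (PySem.Str.lower pos2)
  if p1 == p2 then true
  else pvScan pvGroups p1 p2

-- ===== PORT B =====
-- {alias: i for i, group in enumerate(_POSITION_GROUPS) for alias in group}, built once
def pvBuild (gs : List (List String)) (i : Int) (d : PySem.Dict String Int) : PySem.Dict String Int :=
  match gs with
  | [] => d
  | g :: rest => pvBuild rest (i + 1) (g.foldl (fun d a => d.insert a i) d)

def pvTable : PySem.Dict String Int := pvBuild pvGroups 0 PySem.Dict.empty

def positions_similar_py_alt (pos1 : String) (pos2 : String) : Bool :=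
  let p1 := PySem.Str.strip (PySem.Str.lower pos1)
  let p2 := PySem.Str.strip (PySem.Str.lower pos2)
  if p1 == p2 then true
  else
    match pvTable.get? p1 with
    | none => false
    | some g1 => pvTable.get? p2 == some g1

-- ===== PRECONDITION & SPEC =====
def Spec_positions_similar_py (pos1 : String) (pos2 : String) (out : Bool) : Prop := out = positions_similar_py_alt pos1 pos2
instance (pos1 : String) (pos2 : String) (out : Bool) : Decidable (Spec_positions_similar_py pos1 pos2 out) := by unfold Spec_positions_similar_py; infer_instance

-- ===== CLAIM (what is proved, stated in full; the proofs are below) =====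
def Claim_equal_positions_similar_py : Prop := ∀ (pos1 : String) (pos2 : String), Dom_positions_similar_py pos1 pos2 → Spec_positions_similar_py pos1 pos2 (positions_similar_py pos1 pos2)

-- ===== LEMMAS AND PROOFS =====

-- index of the first group containing q, counting from i
def pvIdx? (gs : List (List String)) (i : Int) (q : String) : Option Int :=
  match gs with
  | [] => none
  | g :: rest => if g.contains q then some i else pvIdx? rest (i + 1) q

lemma pvIdx?_ge (gs : List (List String)) (i : Int) (q : String) (j : Int)
    (h : pvIdx? gs i q = some j) : i ≤ j := by
  induction gs generalizing i with
  | nil => simp [pvIdx?] at h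
  | cons g rest ih =>
    simp only [pvIdx?] at h
    split at h
    · simp only [Option.some.injEq] at h; omega
    · have := ih (i + 1) h; omega

lemma pvIdx?_none_of_not_mem (gs : List (List String)) (i : Int) (q : String)
    (h : q ∉ gs.flatten) : pvIdx? gs i q = none := by
  induction gs generalizing i with
  | nil => rfl
  | cons g rest ih =>
    simp only [List.flatten_cons, List.mem_append, not_or] at h
    simp only [pvIdx?]
    rw [if_neg (by simpa using h.1), ih (i + 1) h.2]

lemma pvScan_false_of_not_mem (gs : List (List String)) (p1 p2 : String)
    (h : p1 ∉ gs.flatten) : pvScan gs p1 p2 = false := by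
  induction gs with
  | nil => rfl
  | cons g rest ih =>
    simp only [List.flatten_cons, List.mem_append, not_or] at h
    simp only [pvScan]
    rw [if_neg (by simp; intro hc _; exact absurd hc h.1), ih h.2]

lemma get?_foldl_insert (g : List String) (v : Int) (d : PySem.Dict String Int) (q : String) :
    (g.foldl (fun d a => d.insert a v) d).get? q = if q ∈ g then some v else d.get? q := by
  induction g generalizing d with
  | nil => simp
  | cons a g' ih =>
    simp only [List.foldl_cons, ih, List.mem_cons]
    by_cases hq : q ∈ g'
    · simp [hq]
    · by_cases ha : q = a <;> simp [hq, ha, PySem.Dict.get?_insert]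

lemma get?_pvBuild (gs : List (List String)) (i : Int) (d : PySem.Dict String Int) (q : String)
    (hnd : gs.flatten.Nodup) :
    (pvBuild gs i d).get? q =
      match pvIdx? gs i q with
      | some j => some j
      | none => d.get? q := by
  induction gs generalizing i d with
  | nil => rfl
  | cons g rest ih =>
    simp only [List.flatten_cons, List.nodup_append] at hnd
    obtain ⟨hg, hrest, hdisj⟩ := hnd
    simp only [pvBuild, pvIdx?]
    rw [ih (i + 1) _ hrest]
    by_cases hq : q ∈ g
    · have hqr : q ∉ rest.flatten := fun hc => hdisj q hq q hc rfl
      rw [pvIdx?_none_of_not_mem rest (i + 1) q hqr]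
      simp [hq, get?_foldl_insert]
    · simp only [List.contains_iff_mem]
      rw [if_neg (by simpa using hq)]
      cases h : pvIdx? rest (i + 1) q with
      | some j => simp
      | none => simp [get?_foldl_insert, hq]

lemma pvScan_true_mem (gs : List (List String)) (p1 p2 : String)
    (h : pvScan gs p1 p2 = true) : ∃ g ∈ gs, p1 ∈ g ∧ p2 ∈ g := by
  induction gs with
  | nil => simp [pvScan] at h
  | cons g rest ih =>
    simp only [pvScan] at h
    split at h
    · rename_i hc
      simp only [Bool.and_eq_true, List.contains_iff_mem] at hc
      exact ⟨g, by simp, hc.1, hc.2⟩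
    · obtain ⟨g', hg', hm⟩ := ih h
      exact ⟨g', by simp [hg'], hm⟩

lemma pvScan_eq_idx (gs : List (List String)) (i : Int) (p1 p2 : String)
    (hnd : gs.flatten.Nodup) :
    pvScan gs p1 p2 =
      match pvIdx? gs i p1, pvIdx? gs i p2 with
      | some a, some b => a == b
      | _, _ => false := by
  induction gs generalizing i with
  | nil => rfl
  | cons g rest ih =>
    simp only [List.flatten_cons, List.nodup_append] at hnd
    obtain ⟨hg, hrest, hdisj⟩ := hnd
    simp only [pvScan, pvIdx?, List.contains_iff_mem]
    by_cases h1 : p1 ∈ g <;> by_cases h2 : p2 ∈ g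
    · simp [h1, h2]
    · -- p1 in g, p2 not: scan of rest is false (p1 not in rest), idx p1 = some i, idx p2 ≥ i+1
      have h1r : p1 ∉ rest.flatten := fun hc => hdisj p1 h1 p1 hc rfl
      rw [if_neg (by simp [h1, h2]), pvScan_false_of_not_mem rest p1 p2 (by simpa using h1r)]
      simp only [h1, if_true, if_neg h2]
      cases h : pvIdx? rest (i + 1) p2 with
      | none => simp
      | some j =>
        have := pvIdx?_ge rest (i + 1) p2 j h
        simp only []
        have : (i == j) = false := by simp; omega
        simp [this]
    · have h2r : p2 ∉ rest.flatten := fun hc => hdisj p2 h2 p2 hc rfl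
      rw [if_neg (by simp [h1, h2]),
          pvIdx?_none_of_not_mem rest (i + 1) p2 (by simpa using h2r)]
      simp only [h2, if_true, if_neg h1]
      cases hs : pvScan rest p1 p2 with
      | false =>
        cases h : pvIdx? rest (i + 1) p1 with
        | none => simp
        | some j =>
          have := pvIdx?_ge rest (i + 1) p1 j h
          have : (j == i) = false := by simp; omega
          simp [this]
      | true =>
        exfalso
        obtain ⟨g', hg', _, hm2⟩ := pvScan_true_mem rest p1 p2 hs
        exact h2r (List.mem_flatten.mpr ⟨g', hg', hm2⟩)
    · rw [if_neg (by simp [h1]), if_neg h1, if_neg h2]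
      exact ih (i + 1) hrest

-- nodup of the concrete alias list
lemma pvGroups_nodup : pvGroups.flatten.Nodup := by decide

-- ===== VERDICT (by name: the statement is the Claim_ definition above) =====
theorem positions_similar_py_spec : Claim_equal_positions_similar_py := by
  intro pos1 pos2 _
  unfold Spec_positions_similar_py positions_similar_py positions_similar_py_alt
  set p1 := PySem.Str.strip (PySem.Str.lower pos1)
  set p2 := PySem.Str.strip (PySem.Str.lower pos2)
  by_cases h : p1 == p2
  · simp [h]
  · simp only [h, Bool.false_eq_true, if_false]
    rw [pvScan_eq_idx pvGroups 0 p1 p2 pvGroups_nodup]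
    unfold pvTable
    rw [get?_pvBuild pvGroups 0 _ p1 pvGroups_nodup,
        get?_pvBuild pvGroups 0 _ p2 pvGroups_nodup]
    cases pvIdx? pvGroups 0 p1 <;> cases pvIdx? pvGroups 0 p2 <;>
      simp [PySem.Dict.get?_empty, eq_comm]
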